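-- pv_equiv track=rewrite | github.com/taofei95/quict | QuICT/qcda/optimization/cnot_template/cnot_force_depth.py | generate_layer
-- ===== SOURCE A (Python) =====
-- def generate_layer(n):
--     """ generate combination layer for n qubits(n in [2, 5])
--
--     Args:
--         n(int): the qubits of layer, in [2, 5]
--     Returns:
--         list<list<tuple<int, int>>>: the list of layers
--     """
--     layers = []
--
--     # single layer
--     for i in range(n):
--         for j in range(n):
--             if i != j:
--                 layers.append([(i, j)])
--
--     # double layer
--     for i in range(n):
--         for j in range(n):
--             for k in range(n):
--                 for l in range(n):
--                     if i != j and i != k and i != l and j != k and j != l and k != l: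
--                         layers.append([(i, j), (k, l)])
--
--     return layers
-- ===== SOURCE B (Python) =====
-- def generate_layer(n):
--     """ generate combination layer for n qubits(n in [2, 5])
--
--     Args:
--         n(int): the qubits of layer, in [2, 5]
--     Returns:
--         list<list<tuple<int, int>>>: the list of layers
--     """
--     def perms(chosen, r, out):
--         # recursively extend `chosen` with r more indices not used yet,
--         # trying candidates in increasing order (lexicographic output)
--         if r == 0:
--             out.append(chosen)
--             return
--         for x in range(n):
--             if x not in chosen:
--                 perms(chosen + [x], r - 1, out)
--
--     twos = []
--     perms([], 2, twos)
--     fours = []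
--     perms([], 4, fours)
--     return [[(a, b)] for a, b in twos] + [[(a, b), (c, d)] for a, b, c, d in fours]
-- ===== Notes on version B (the rewrite author's own statement) =====
-- stated objective: alternative
-- what changed: B replaces A's fixed nested index loops with one recursive backtracking generator of r-permutations of range(n) (building each tuple by extending a partial choice with unused indices), called once for pairs and once for quadruples, then maps the tuples to layers.
import Mathlib
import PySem

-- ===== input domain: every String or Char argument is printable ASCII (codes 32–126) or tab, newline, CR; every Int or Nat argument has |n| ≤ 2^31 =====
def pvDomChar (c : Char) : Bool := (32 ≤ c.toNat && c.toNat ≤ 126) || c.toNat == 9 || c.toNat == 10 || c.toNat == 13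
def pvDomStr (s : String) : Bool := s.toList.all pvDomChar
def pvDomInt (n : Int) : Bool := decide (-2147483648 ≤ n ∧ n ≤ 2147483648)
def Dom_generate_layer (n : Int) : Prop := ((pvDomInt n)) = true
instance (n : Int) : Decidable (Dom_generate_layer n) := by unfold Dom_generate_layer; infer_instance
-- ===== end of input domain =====

-- B generates the layers by one recursive backtracking r-permutation generator (r = 2 and r = 4)
-- instead of A's fixed nested index loops: an alternative decomposition, same output and cost.

-- ===== PORT A =====
def generate_layer (n : Int) : List (List (Int × Int)) :=
  let r := PySem.List.pyRange 0 n 1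
  -- single layer
  let layers : List (List (Int × Int)) :=
    r.foldl (fun acc i =>
      r.foldl (fun acc j =>
        if i != j then acc ++ [[(i, j)]] else acc) acc) []
  -- double layer
  r.foldl (fun acc i =>
    r.foldl (fun acc j =>
      r.foldl (fun acc k =>
        r.foldl (fun acc l =>
          if i != j && i != k && i != l && j != k && j != l && k != l then
            acc ++ [[(i, j), (k, l)]]
          else acc) acc) acc) acc) layers

-- ===== PORT B =====
-- recursive backtracking generator: extend `chosen` with r more unused indices, in increasing order
def pvPermsB (n : Int) (chosen : List Int) : Nat → List (List Int)
  | 0 => [chosen]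
  | Nat.succ r => (PySem.List.pyRange 0 n 1).foldl
      (fun acc x => if chosen.contains x then acc else acc ++ pvPermsB n (chosen ++ [x]) r) []

def pvPairLayer (t : List Int) : List (Int × Int) :=
  match t with
  | [a, b] => [(a, b)]
  | _ => []

def pvQuadLayer (t : List Int) : List (Int × Int) :=
  match t with
  | [a, b, c, d] => [(a, b), (c, d)]
  | _ => []

def generate_layer_alt (n : Int) : List (List (Int × Int)) :=
  (pvPermsB n [] 2).map pvPairLayer ++ (pvPermsB n [] 4).map pvQuadLayer

-- ===== PRECONDITION & SPEC =====
def Spec_generate_layer (n : Int) (out : List (List (Int × Int))) : Prop := out = generate_layer_alt n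
instance (n : Int) (out : List (List (Int × Int))) : Decidable (Spec_generate_layer n out) := by unfold Spec_generate_layer; infer_instance

-- ===== CLAIM (what is proved, stated in full; the proofs are below) =====
def Claim_equal_generate_layer : Prop := ∀ (n : Int), Dom_generate_layer n → Spec_generate_layer n (generate_layer n)

-- ===== LEMMAS AND PROOFS =====

theorem pvPermsB_succ (n : Int) (chosen : List Int) (r : Nat) :
    pvPermsB n chosen (r + 1) = (PySem.List.pyRange 0 n 1).flatMap
      (fun x => if chosen.contains x then [] else pvPermsB n (chosen ++ [x]) r) := by
  show List.foldl _ [] _ = _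
  rw [PySem.List.foldl_congr_mem
    (g := fun acc x => acc ++ (if chosen.contains x then [] else pvPermsB n (chosen ++ [x]) r))]
  · rw [PySem.List.foldl_append_eq_flatMap]; simp
  · intro acc x _; by_cases h : x ∈ chosen <;> simp [h]

-- a filter-then-map loop in flatMap form
theorem pv_filter_map_eq_flatMap_if {α β : Type} (p : α → Bool) (f : α → β) (l : List α) :
    (l.filter p).map f = l.flatMap (fun x => if p x then [f x] else []) := by
  induction l with
  | nil => rfl
  | cons a t ih => by_cases h : p a <;> simp [h, ih]

-- push an outer guard into a flatMap
theorem pv_if_nil_flatMap {α β : Type} (c : Bool) (l : List α) (f : α → List β) :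
    (if c then ([] : List β) else l.flatMap f) = l.flatMap (fun x => if c then [] else f x) := by
  cases c <;> simp

-- ===== VERDICT (by name: the statement is the Claim_ definition above) =====
theorem generate_layer_spec : Claim_equal_generate_layer := by
  intro n _
  unfold Spec_generate_layer generate_layer generate_layer_alt
  simp only [pvPermsB_succ,
    PySem.List.foldl_append_if, PySem.List.foldl_append_eq_flatMap, List.nil_append,
    pv_filter_map_eq_flatMap_if, pv_if_nil_flatMap, List.map_flatMap]
  congr 1
  · apply List.flatMap_congr
    intro i _
    apply List.flatMap_congr
    intro j _
    simp only [List.contains_eq_mem, List.not_mem_nil, List.mem_cons,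
      decide_eq_true_eq, or_false, pvPermsB, bne_iff_ne, ne_eq]
    split_ifs
    all_goals simp [pvPairLayer]
    all_goals omega
  · apply List.flatMap_congr
    intro i _
    apply List.flatMap_congr
    intro j _
    apply List.flatMap_congr
    intro k _
    apply List.flatMap_congr
    intro l _
    simp only [List.contains_eq_mem, List.not_mem_nil, List.mem_cons,
      decide_eq_true_eq, or_false, List.nil_append, List.cons_append, pvPermsB,
      Bool.and_eq_true, bne_iff_ne, ne_eq]
    split_ifs
    all_goals simp [pvQuadLayer]
    all_goals omega
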